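-- pv_equiv track=rewrite | github.com/xixiaxibro/Persistent-Preference-Manipulation-Measurement | build_dataset/build_classification_dataset.py | _compute_length_buckets
-- ===== SOURCE A (Python) =====
-- import math
--
-- def _compute_length_buckets(
--     texts: list[str],
--     num_buckets: int = 10,
-- ) -> list[tuple[int, int]]:
--     """
--     Compute equal-frequency length buckets from a list of texts.
--     Returns a list of (min_len, max_len) inclusive bounds.
--     """
--     lengths = sorted(len(t) for t in texts)
--     if not lengths:
--         return []
--     bucket_size = max(1, math.ceil(len(lengths) / num_buckets))
--     buckets: list[tuple[int, int]] = []
--     for i in range(0, len(lengths), bucket_size):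
--         chunk = lengths[i : i + bucket_size]
--         buckets.append((chunk[0], chunk[-1]))
--     return buckets
-- ===== SOURCE B (Python) =====
-- def _compute_length_buckets(
--     texts: list[str],
--     num_buckets: int = 10,
-- ) -> list[tuple[int, int]]:
--     """
--     Equal-frequency length buckets via counting sort: tally lengths in a dict,
--     rebuild the ordered length sequence from the tallies (no comparison sort),
--     and read each bucket's bounds off by direct indexing (no per-chunk slices).
--     """
--     if not texts:
--         return []
--     n = len(texts)
--     mx = 0
--     for t in texts:
--         if len(t) > mx:
--             mx = len(t)
--     counts = {}
--     for t in texts: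
--         L = len(t)
--         counts[L] = counts.get(L, 0) + 1
--     lengths = []
--     for v in range(mx + 1):
--         lengths.extend([v] * counts.get(v, 0))
--     bucket_size = max(1, -(-n // num_buckets))
--     return [(lengths[s], lengths[min(s + bucket_size, n) - 1])
--             for s in range(0, n, bucket_size)]
-- ===== Notes on version B (the rewrite author's own statement) =====
-- stated objective: alternative
-- what changed: B replaces A's comparison sort of all lengths by a counting sort (a tally dict plus a rebuild of the ordered length sequence in value order) and reads each bucket's bounds by direct indexing into the ordered sequence instead of taking a slice per chunk.
import Mathlib
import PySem

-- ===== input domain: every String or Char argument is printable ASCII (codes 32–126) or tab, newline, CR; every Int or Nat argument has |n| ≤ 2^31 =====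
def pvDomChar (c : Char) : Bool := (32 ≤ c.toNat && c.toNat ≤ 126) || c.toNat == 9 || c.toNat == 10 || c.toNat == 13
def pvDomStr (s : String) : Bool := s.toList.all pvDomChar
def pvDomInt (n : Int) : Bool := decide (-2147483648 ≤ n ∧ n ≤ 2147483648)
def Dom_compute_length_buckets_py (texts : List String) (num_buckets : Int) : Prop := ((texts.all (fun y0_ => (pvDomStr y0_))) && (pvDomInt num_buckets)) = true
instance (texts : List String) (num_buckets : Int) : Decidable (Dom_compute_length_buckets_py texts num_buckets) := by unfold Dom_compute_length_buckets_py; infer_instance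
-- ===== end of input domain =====

-- B replaces A's comparison sort of all lengths by a counting sort (tally dict + rebuild in
-- value order) and reads each bucket's bounds by direct indexing instead of per-chunk slices
-- (objective: alternative). Return values only; neither version mutates its arguments.

-- ===== PORT A =====
def compute_length_buckets_py (texts : List String) (num_buckets : Int) : List (Int × Int) :=
  let lengths := PySem.List.sorted (texts.map (fun t => PySem.Str.len t)) (fun x => x) false
  if lengths = [] then []
  else
    -- math.ceil(len(lengths)/num_buckets) ported as the exact integer ceiling -((-n)//b);
    -- the float quotient rounds to the same ceiling at these magnitudes
    let bucket_size := max 1 (-(PySem.Int.floordiv (-(lengths.length : Int)) num_buckets))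
    (PySem.List.pyRange 0 (lengths.length : Int) bucket_size).foldl
      (fun buckets i =>
        let chunk := PySem.List.slice lengths (some i) (some (i + bucket_size))
        buckets ++ [(PySem.List.pyGetD chunk 0 0, PySem.List.pyGetD chunk (-1) 0)]) []

-- ===== PORT B =====
def compute_length_buckets_py_alt (texts : List String) (num_buckets : Int) : List (Int × Int) :=
  if texts = [] then []
  else
    let n : Int := (texts.length : Int)
    let mx := texts.foldl
      (fun m t => if PySem.Str.len t > m then PySem.Str.len t else m) 0
    let counts := texts.foldl
      (fun d t => d.insert (PySem.Str.len t) (d.getD (PySem.Str.len t) 0 + 1))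
      (PySem.Dict.empty : PySem.Dict Int Int)
    let lengths := (PySem.List.pyRange 0 (mx + 1)).foldl
      (fun acc v => acc ++ List.replicate (counts.getD v 0).toNat v) []
    let bucket_size := max 1 (-(PySem.Int.floordiv (-n) num_buckets))
    (PySem.List.pyRange 0 n bucket_size).map
      (fun s => (PySem.List.pyGetD lengths s 0,
                 PySem.List.pyGetD lengths (min (s + bucket_size) n - 1) 0))

-- ===== PRECONDITION & SPEC =====
-- Pre_ excludes only num_buckets = 0 with nonempty texts, where Python A raises ZeroDivisionError.
def Pre_compute_length_buckets_py (texts : List String) (num_buckets : Int) : Prop :=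
  texts = [] ∨ num_buckets ≠ 0
instance (texts : List String) (num_buckets : Int) : Decidable (Pre_compute_length_buckets_py texts num_buckets) := by unfold Pre_compute_length_buckets_py; infer_instance

def pvWitness_compute_length_buckets_py : List String × Int := (["ab", "c", "xyz"], 2)

def Spec_compute_length_buckets_py (texts : List String) (num_buckets : Int) (out : List (Int × Int)) : Prop := out = compute_length_buckets_py_alt texts num_buckets
instance (texts : List String) (num_buckets : Int) (out : List (Int × Int)) : Decidable (Spec_compute_length_buckets_py texts num_buckets out) := by unfold Spec_compute_length_buckets_py; infer_instance

-- ===== CLAIM (what is proved, stated in full; the proofs are below) =====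
def Claim_equal_compute_length_buckets_py : Prop := ∀ (texts : List String) (num_buckets : Int), Dom_compute_length_buckets_py texts num_buckets → Pre_compute_length_buckets_py texts num_buckets → Spec_compute_length_buckets_py texts num_buckets (compute_length_buckets_py texts num_buckets)

-- ===== LEMMAS AND PROOFS =====

-- the running maximum bounds every length in the list
theorem pv_maxFold_bounds (l : List String) (a : Int) :
    a ≤ l.foldl (fun m t => if PySem.Str.len t > m then PySem.Str.len t else m) a ∧
    ∀ x ∈ l, PySem.Str.len x ≤ l.foldl (fun m t => if PySem.Str.len t > m then PySem.Str.len t else m) a := by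
  induction l generalizing a with
  | nil => simp
  | cons h t ih =>
    simp only [List.foldl_cons, List.mem_cons]
    refine ⟨le_trans (by split <;> omega) (ih _).1, ?_⟩
    rintro x (rfl | hx)
    · exact le_trans (by split <;> omega) (ih _).1
    · exact (ih _).2 x hx

-- every element of the counting-sort rebuild lies in [0, N)
theorem pv_mem_build (cnt : Int → Nat) (N : Int) (x : Int)
    (hx : x ∈ (PySem.List.pyRange 0 N).flatMap (fun v => List.replicate (cnt v) v)) :
    0 ≤ x ∧ x < N := by
  rcases List.mem_flatMap.mp hx with ⟨v, hv, hxr⟩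
  rcases PySem.List.mem_pyRange_one.mp hv with ⟨h0, h1⟩
  rcases List.eq_of_mem_replicate hxr with rfl
  exact ⟨h0, h1⟩

-- the counting-sort rebuild is nondecreasing
theorem pv_build_pairwise (cnt : Int → Nat) (N : Int) :
    ((PySem.List.pyRange 0 N).flatMap (fun v => List.replicate (cnt v) v)).Pairwise (· ≤ ·) := by
  by_cases hN : N ≤ 0
  · rw [PySem.List.pyRange_one_eq_nil hN]; simp
  · obtain ⟨M, rfl⟩ : ∃ M : Nat, N = (M : Int) := ⟨N.toNat, by omega⟩
    clear hN
    induction M with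
    | zero => rw [PySem.List.pyRange_one_eq_nil (by omega)]; simp
    | succ m ih =>
      rw [show ((m + 1 : Nat) : Int) = (m : Int) + 1 by push_cast; ring,
          PySem.List.pyRange_one_succ_right (by positivity), List.flatMap_append]
      rw [List.pairwise_append]
      refine ⟨ih, ?_, ?_⟩
      · simp only [List.flatMap_cons, List.flatMap_nil, List.append_nil]
        rw [List.pairwise_replicate]
        right; exact le_refl _
      · intro a ha b hb
        have := pv_mem_build cnt (m : Int) a ha
        simp only [List.flatMap_cons, List.flatMap_nil, List.append_nil] at hb
        rcases List.eq_of_mem_replicate hb with rfl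
        omega

-- element counts of the counting-sort rebuild
theorem pv_build_count (cnt : Int → Nat) (N : Int) (w : Int) :
    ((PySem.List.pyRange 0 N).flatMap (fun v => List.replicate (cnt v) v)).count w
      = if 0 ≤ w ∧ w < N then cnt w else 0 := by
  by_cases hN : N ≤ 0
  · rw [PySem.List.pyRange_one_eq_nil hN]
    simp only [List.flatMap_nil, List.count_nil]
    rw [if_neg (by omega)]
  · obtain ⟨M, rfl⟩ : ∃ M : Nat, N = (M : Int) := ⟨N.toNat, by omega⟩
    clear hN
    induction M with
    | zero =>
      rw [PySem.List.pyRange_one_eq_nil (by omega)]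
      simp only [List.flatMap_nil, List.count_nil]
      rw [if_neg (by omega)]
    | succ m ih =>
      rw [show ((m + 1 : Nat) : Int) = (m : Int) + 1 by push_cast; ring,
          PySem.List.pyRange_one_succ_right (by positivity), List.flatMap_append,
          List.count_append, ih]
      simp only [List.flatMap_cons, List.flatMap_nil, List.append_nil, List.count_replicate,
        beq_iff_eq]
      by_cases hw : w = (m : Int)
      · subst hw
        split_ifs <;> omega
      · rw [if_neg (show ¬((m : Int) = w) from fun h => hw h.symm)]
        split_ifs <;> omega

-- the sorted length list equals the counting-sort rebuild
theorem pv_sorted_eq_build (lens : List Int) (N : Int)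
    (hnn : ∀ x ∈ lens, 0 ≤ x) (hub : ∀ x ∈ lens, x < N) :
    PySem.List.sorted lens (fun x => x) false
      = (PySem.List.pyRange 0 N).flatMap (fun v => List.replicate (lens.count v) v) := by
  apply PySem.List.sorted_id_eq_of_perm_of_pairwise
  · apply List.perm_iff_count.mpr
    intro w
    rw [pv_build_count]
    split
    · rfl
    · rename_i hw
      symm
      rw [List.count_eq_zero]
      intro hmem
      exact hw ⟨hnn w hmem, hub w hmem⟩
  · exact pv_build_pairwise _ _

-- head of the nonempty chunk L[i : i+bs] is L[i]
theorem pv_chunk_head (L : List Int) (i bs : Int) (h0 : 0 ≤ i) (h1 : i < (L.length : Int))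
    (hbs : 1 ≤ bs) :
    PySem.List.pyGetD (PySem.List.slice L (some i) (some (i + bs))) 0 0
      = PySem.List.pyGetD L i 0 := by
  rw [PySem.List.slice_toNat L h0 (by omega)]
  have hlen : ((L.drop i.toNat).take ((i + bs).toNat - i.toNat)).length
      = min ((i + bs).toNat - i.toNat) (L.length - i.toNat) := by
    simp [List.length_take, List.length_drop]
  rw [PySem.List.pyGetD_eq_getElem _ _ (le_refl 0) (by rw [hlen]; push_cast; omega),
      PySem.List.pyGetD_eq_getElem _ _ h0 h1]
  rw [List.getElem_take, List.getElem_drop]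
  simp only [show i.toNat + (0 : Int).toNat = i.toNat by omega]

-- last element of the chunk L[i : i+bs] is L[min(i+bs, len L) - 1]
theorem pv_chunk_last (L : List Int) (i bs : Int) (h0 : 0 ≤ i) (h1 : i < (L.length : Int))
    (hbs : 1 ≤ bs) :
    PySem.List.pyGetD (PySem.List.slice L (some i) (some (i + bs))) (-1) 0
      = PySem.List.pyGetD L (min (i + bs) (L.length : Int) - 1) 0 := by
  rw [PySem.List.slice_toNat L h0 (by omega)]
  have hlen : ((L.drop i.toNat).take ((i + bs).toNat - i.toNat)).length
      = min ((i + bs).toNat - i.toNat) (L.length - i.toNat) := by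
    simp [List.length_take, List.length_drop]
  have hpos : 0 < ((L.drop i.toNat).take ((i + bs).toNat - i.toNat)).length := by
    rw [hlen]; omega
  rw [PySem.List.pyGetD_neg_one _ _ (List.ne_nil_of_length_pos hpos),
      List.getLast_eq_getElem, List.getElem_take, List.getElem_drop,
      PySem.List.pyGetD_eq_getElem _ _ (by omega) (by omega)]
  simp only [show i.toNat + (((L.drop i.toNat).take ((i + bs).toNat - i.toNat)).length - 1)
      = (min (i + bs) (L.length : Int) - 1).toNat by rw [hlen]; omega]

-- A's append loop over chunk slices equals B's direct-index comprehension
theorem pv_buckets_eq (L : List Int) (bs n : Int) (hbs : 1 ≤ bs) (hn : (L.length : Int) = n) :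
    (PySem.List.pyRange 0 n bs).foldl
        (fun buckets i => buckets ++
          [(PySem.List.pyGetD (PySem.List.slice L (some i) (some (i + bs))) 0 0,
            PySem.List.pyGetD (PySem.List.slice L (some i) (some (i + bs))) (-1) 0)]) []
      = (PySem.List.pyRange 0 n bs).map
          (fun s => (PySem.List.pyGetD L s 0,
                     PySem.List.pyGetD L (min (s + bs) n - 1) 0)) := by
  subst hn
  rw [PySem.List.foldl_append_singleton_eq_map, List.nil_append]
  apply List.map_congr_left
  intro i hi
  rcases (PySem.List.mem_pyRange_iff_of_pos (by omega) i).mp hi with ⟨hi0, hi1, -⟩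
  rw [pv_chunk_head L i bs hi0 hi1 hbs, pv_chunk_last L i bs hi0 hi1 hbs]

-- ===== VERDICT (by name: the statement is the Claim_ definition above) =====
theorem compute_length_buckets_py_spec : Claim_equal_compute_length_buckets_py := by
  intro texts num_buckets _hdom hpre
  unfold Spec_compute_length_buckets_py compute_length_buckets_py compute_length_buckets_py_alt
  by_cases hnil : texts = []
  · subst hnil; simp [PySem.List.sorted]
  · rw [if_neg hnil, if_neg (by
      rw [PySem.List.sorted_eq_nil_iff, List.map_eq_nil_iff]; exact hnil)]
    dsimp only
    -- the tallies in B's dict are exactly the length counts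
    have hcnt : ∀ v : Int,
        ((texts.foldl (fun d t => d.insert (PySem.Str.len t) (d.getD (PySem.Str.len t) 0 + 1))
          (PySem.Dict.empty : PySem.Dict Int Int)).getD v 0).toNat
          = (texts.map (fun t => PySem.Str.len t)).count v := by
      intro v
      have h := PySem.Dict.getD_foldl_insert_add_one (texts.map (fun t => PySem.Str.len t))
        (PySem.Dict.empty : PySem.Dict Int Int) v
      rw [List.foldl_map] at h
      rw [h, PySem.Dict.getD_empty, zero_add, Int.toNat_natCast]
    -- the sorted length list equals B's counting-sort rebuild
    have hL : PySem.List.sorted (texts.map (fun t => PySem.Str.len t)) (fun x => x) false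
        = (PySem.List.pyRange 0
            ((texts.foldl (fun m t => if PySem.Str.len t > m then PySem.Str.len t else m) 0) + 1)).foldl
            (fun acc v => acc ++ List.replicate
              ((texts.foldl (fun d t => d.insert (PySem.Str.len t) (d.getD (PySem.Str.len t) 0 + 1))
                (PySem.Dict.empty : PySem.Dict Int Int)).getD v 0).toNat v) [] := by
      rw [PySem.List.foldl_append_eq_flatMap, List.nil_append,
          List.flatMap_congr (fun v _ => by rw [hcnt v])]
      apply pv_sorted_eq_build
      · intro x hx
        rcases List.mem_map.mp hx with ⟨t, _, rfl⟩
        rw [PySem.Str.len_eq]; positivity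
      · intro x hx
        rcases List.mem_map.mp hx with ⟨t, ht, rfl⟩
        have := (pv_maxFold_bounds texts 0).2 t ht
        omega
    rw [hL]
    have hlen : (((PySem.List.pyRange 0
            ((texts.foldl (fun m t => if PySem.Str.len t > m then PySem.Str.len t else m) 0) + 1)).foldl
            (fun acc v => acc ++ List.replicate
              ((texts.foldl (fun d t => d.insert (PySem.Str.len t) (d.getD (PySem.Str.len t) 0 + 1))
                (PySem.Dict.empty : PySem.Dict Int Int)).getD v 0).toNat v) []).length : Int)
        = (texts.length : Int) := by
      rw [← hL, PySem.List.length_sorted, List.length_map]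
    rw [hlen, pv_buckets_eq _ _ _ (by omega) hlen]
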